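-- pv_equiv track=rewrite | github.com/suiseiiii/INF1002-Labs | Lab 4/elfish.py | check_elfish
-- ===== SOURCE A (Python) =====
-- def check_elfish(letters, word):
--      if not letters:
--           return True
--      elif len(word) == 0:
--           return False
--      elif word[0] in letters:
--           letters.remove(word[0])
--      word = word[1:]
--      return check_elfish(letters, word)
-- ===== SOURCE B (Python) =====
-- def check_elfish(letters, word):
--     need = {}
--     for s in letters:
--         need[s] = need.get(s, 0) + 1
--     for ch in word:
--         if need.get(ch, 0) > 0:
--             need[ch] = need[ch] - 1
--     return all(v == 0 for v in need.values())
-- ===== Notes on version B (the rewrite author's own statement) =====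
-- stated objective: faster
-- what changed: Replaces A's recursion that rescans and mutates the letters list (membership test + list.remove per character, plus word slicing) with a single-pass counting-dict multiset-subtraction; B does not mutate letters (return value equivalence).
import Mathlib
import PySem

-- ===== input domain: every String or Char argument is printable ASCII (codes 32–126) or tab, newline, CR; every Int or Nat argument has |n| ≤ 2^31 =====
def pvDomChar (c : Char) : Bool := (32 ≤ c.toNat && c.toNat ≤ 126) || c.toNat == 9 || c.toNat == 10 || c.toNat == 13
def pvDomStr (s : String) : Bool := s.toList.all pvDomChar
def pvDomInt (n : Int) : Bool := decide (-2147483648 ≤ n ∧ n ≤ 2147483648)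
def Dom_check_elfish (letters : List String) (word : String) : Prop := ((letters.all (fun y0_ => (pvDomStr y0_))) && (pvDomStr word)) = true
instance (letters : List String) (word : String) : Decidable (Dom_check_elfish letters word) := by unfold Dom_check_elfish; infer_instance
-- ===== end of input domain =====

-- B replaces A's recursion that rescans and removes from the letters list with a one-pass
-- counting dict (objective: faster). A mutates `letters` in place, B does not: the
-- equivalence proved here is about the RETURN value only.

-- ===== PORT A =====
-- A's recursion over `word`; `word[0]` is the one-character string `String.ofList [c]`;
-- `letters.remove(word[0])` is PySem.List.remove?, guarded by the `in` test (never none there).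
def check_elfish_rec : List Char → List String → Bool
  | [], letters => if letters = [] then true else false
  | c :: rest, letters =>
    if letters = [] then true
    else
      check_elfish_rec rest
        (if letters.contains (String.ofList [c]) then
          (PySem.List.remove? letters (String.ofList [c])).getD letters
        else letters)

def check_elfish (letters : List String) (word : String) : Bool :=
  check_elfish_rec word.toList letters

-- ===== PORT B =====
-- Source B: build `need` (counts of letters), decrement (only while positive) scanning word,
-- then `all(v == 0 for v in need.values())`.
def check_elfish_alt (letters : List String) (word : String) : Bool :=
  let need : PySem.Dict String Int :=
    letters.foldl (fun d s => d.insert s (d.getD s 0 + 1)) PySem.Dict.empty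
  let need2 : PySem.Dict String Int :=
    word.toList.foldl
      (fun d c =>
        if d.getD (String.ofList [c]) 0 > 0 then
          d.insert (String.ofList [c]) (d.getD (String.ofList [c]) 0 - 1)
        else d)
      need
  need2.values.all (fun v => v == 0)

-- ===== PRECONDITION & SPEC =====
def Spec_check_elfish (letters : List String) (word : String) (out : Bool) : Prop := out = check_elfish_alt letters word
instance (letters : List String) (word : String) (out : Bool) : Decidable (Spec_check_elfish letters word out) := by unfold Spec_check_elfish; infer_instance

-- ===== CLAIM (what is proved, stated in full; the proofs are below) =====
def Claim_equal_check_elfish : Prop := ∀ (letters : List String) (word : String), Dom_check_elfish letters word → Spec_check_elfish letters word (check_elfish letters word)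

-- ===== LEMMAS AND PROOFS =====

-- the multiset-inclusion property both programs decide
def pvSub (letters : List String) (w : List Char) : Prop :=
  ∀ x ∈ letters, letters.count x ≤ (w.map (fun c => String.ofList [c])).count x

-- A's recursion decides pvSub
theorem check_elfish_rec_iff (w : List Char) (L : List String) :
    check_elfish_rec w L = true ↔ pvSub L w := by
  induction w generalizing L with
  | nil =>
    simp only [check_elfish_rec, pvSub, List.map_nil]
    constructor
    · intro h; split at h
      · subst ‹L = []›; intro x hx; cases hx
      · cases h
    · intro h
      rcases L with _ | ⟨a, L'⟩
      · simp
      · exact absurd (h a List.mem_cons_self) (by simp [List.count_cons_self])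
  | cons c rest ih =>
    simp only [check_elfish_rec]
    by_cases hL : L = []
    · subst hL; simp [pvSub]
    · rw [if_neg hL]
      by_cases hmem : String.ofList [c] ∈ L
      · rw [if_pos (by simpa using hmem),
          PySem.List.remove?_eq_some_erase _ _ hmem, Option.getD_some, ih]
        constructor
        · intro h x hx
          simp only [List.map_cons, List.count_cons, beq_iff_eq]
          by_cases hxe : x ∈ L.erase (String.ofList [c])
          · have := h x hxe
            rw [List.count_erase] at this
            simp only [beq_iff_eq] at this
            by_cases hxc : String.ofList [c] = x
            · simp only [hxc, if_true] at this ⊢; omega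
            · simp only [if_neg hxc] at this ⊢; omega
          · have hxc : x = String.ofList [c] := by
              by_contra hne
              exact hxe ((List.mem_erase_of_ne hne).2 hx)
            have h0 : (L.erase (String.ofList [c])).count x = 0 :=
              List.count_eq_zero.2 hxe
            have h1 := List.count_erase_self (a := String.ofList [c]) (l := L)
            rw [hxc] at h0 ⊢
            rw [h1] at h0
            simp only [if_true]
            omega
        · intro h x hx
          have hxL : x ∈ L := List.mem_of_mem_erase hx
          have := h x hxL
          simp only [List.map_cons, List.count_cons, beq_iff_eq] at this
          rw [List.count_erase]
          simp only [beq_iff_eq]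
          by_cases hxc : String.ofList [c] = x
          · simp only [hxc, if_true] at this ⊢; omega
          · simp only [if_neg hxc] at this ⊢; omega
      · rw [if_neg (by simpa using hmem), ih]
        constructor
        · intro h x hx
          exact le_trans (h x hx) (by simp only [List.map_cons]; exact List.count_le_count_cons)
        · intro h x hx
          have := h x hx
          have hxc : String.ofList [c] ≠ x := fun e => hmem (e ▸ hx)
          simp only [List.map_cons, List.count_cons, beq_iff_eq, if_neg hxc,
            add_zero] at this
          exact this

-- d.getD k 0 > 0 forces the key to be present
theorem contains_of_getD_pos (d : PySem.Dict String Int) (k : String)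
    (h : d.getD k 0 > 0) : d.contains k = true := by
  by_cases hc : d.contains k = true
  · exact hc
  · have hn : d.get? k = none :=
      (PySem.Dict.get?_eq_none_iff_contains d k).2 (Bool.not_eq_true _ ▸ (by simpa using hc))
    simp [PySem.Dict.getD, hn] at h

-- value of B's decrement loop at a fixed key: saturating subtraction
theorem decr_getD (w : List Char) (d : PySem.Dict String Int) (x : String)
    (hx : 0 ≤ d.getD x 0) :
    (w.foldl
      (fun d c =>
        if d.getD (String.ofList [c]) 0 > 0 then
          d.insert (String.ofList [c]) (d.getD (String.ofList [c]) 0 - 1)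
        else d) d).getD x 0
      = max 0 (d.getD x 0 - ((w.map (fun c => String.ofList [c])).count x : Int)) := by
  induction w generalizing d with
  | nil => simp only [List.foldl_nil, List.map_nil, List.count_nil]; omega
  | cons c rest ih =>
    simp only [List.foldl_cons, List.map_cons, List.count_cons, beq_iff_eq]
    by_cases hpos : d.getD (String.ofList [c]) 0 > 0
    · rw [if_pos hpos]
      by_cases hxc : String.ofList [c] = x
      · subst hxc
        rw [ih _ (by rw [PySem.Dict.getD_insert]; simp only [if_true]; omega)]
        rw [PySem.Dict.getD_insert]
        simp only [if_true]
        push_cast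
        omega
      · rw [ih _ (by rw [PySem.Dict.getD_insert_of_ne _ _ _ (fun e => hxc e.symm)]; exact hx)]
        rw [PySem.Dict.getD_insert_of_ne _ _ _ (fun e => hxc e.symm)]
        simp only [if_neg hxc, add_zero]
    · rw [if_neg hpos, ih d hx]
      by_cases hxc : String.ofList [c] = x
      · have h0 : d.getD x 0 = 0 := by rw [← hxc] at hx ⊢; omega
        rw [h0]
        simp only [hxc, if_true]
        push_cast
        omega
      · simp only [if_neg hxc, add_zero]

-- the decrement loop does not change the key set
theorem decr_keys (w : List Char) (d : PySem.Dict String Int) :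
    (w.foldl
      (fun d c =>
        if d.getD (String.ofList [c]) 0 > 0 then
          d.insert (String.ofList [c]) (d.getD (String.ofList [c]) 0 - 1)
        else d) d).keys = d.keys := by
  induction w generalizing d with
  | nil => rfl
  | cons c rest ih =>
    simp only [List.foldl_cons]
    by_cases hpos : d.getD (String.ofList [c]) 0 > 0
    · rw [if_pos hpos, ih,
        PySem.Dict.keys_insert_of_contains d _ (contains_of_getD_pos d _ hpos)]
    · rw [if_neg hpos, ih]

-- B decides pvSub
theorem check_elfish_alt_iff (letters : List String) (word : String) :
    check_elfish_alt letters word = true ↔ pvSub letters word.toList := by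
  unfold check_elfish_alt
  simp only [PySem.Dict.foldl_insert_getD_add_one_eq_counter]
  have hkeys := decr_keys word.toList (PySem.Dict.counter letters)
  have hnodup : (word.toList.foldl
      (fun d c =>
        if d.getD (String.ofList [c]) 0 > 0 then
          d.insert (String.ofList [c]) (d.getD (String.ofList [c]) 0 - 1)
        else d) (PySem.Dict.counter letters)).keys.Nodup := by
    rw [hkeys]; exact PySem.Dict.nodup_keys_counter letters
  rw [PySem.Dict.values_eq_map_keys _ hnodup 0, hkeys, PySem.Dict.keys_counter]
  simp only [List.all_eq_true, List.mem_map, beq_iff_eq, forall_exists_index, and_imp,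
    forall_apply_eq_imp_iff₂]
  constructor
  · intro h x hx
    have hmem : x ∈ PySem.Set.ofList letters := (PySem.Set.mem_ofList letters x).2 hx
    have := h x hmem
    rw [decr_getD _ _ _ (by rw [PySem.Dict.getD_counter]; positivity)] at this
    rw [PySem.Dict.getD_counter] at this
    simp only [List.count] at *
    omega
  · intro h x hx
    have hxl : x ∈ letters := (PySem.Set.mem_ofList letters x).1 hx
    have := h x hxl
    rw [decr_getD _ _ _ (by rw [PySem.Dict.getD_counter]; positivity)]
    rw [PySem.Dict.getD_counter]
    simp only [List.count] at *
    omega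

-- ===== VERDICT (by name: the statement is the Claim_ definition above) =====
theorem check_elfish_spec : Claim_equal_check_elfish := by
  intro letters word _
  unfold Spec_check_elfish
  have h1 := check_elfish_rec_iff word.toList letters
  have h2 := check_elfish_alt_iff letters word
  unfold check_elfish
  by_cases h : pvSub letters word.toList
  · rw [h1.2 h, h2.2 h]
  · have a1 : check_elfish_rec word.toList letters = false := by
      cases hb : check_elfish_rec word.toList letters
      · rfl
      · exact absurd (h1.1 hb) h
    have a2 : check_elfish_alt letters word = false := by
      cases hb : check_elfish_alt letters word
      · rfl
      · exact absurd (h2.1 hb) h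
    rw [a1, a2]
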